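-- pv_equiv track=rewrite | github.com/furdog72/TotalCareIT | scorecard/scripts/generate_scorecard.py | determine_metric_type
-- ===== SOURCE A (Python) =====
-- def determine_metric_type(kpi_name):
--     """Determine if metric is 'lower is better' or 'higher is better'"""
--     lower_is_better = ['response time', 'resolution time', 'tickets >7', 'failed backup',
--                        'missing', 'windows 7', 'eol', 'tickets over 30']
--
--     kpi_lower = kpi_name.lower()
--
--     for phrase in lower_is_better:
--         if phrase in kpi_lower:
--             return 'lower_is_better'
--
--     return 'higher_is_better'
-- ===== SOURCE B (Python) =====
-- def determine_metric_type(kpi_name):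
--     """Determine if metric is 'lower is better' or 'higher is better'"""
--     phrases = ['response time', 'resolution time', 'tickets >7', 'failed backup',
--                'missing', 'windows 7', 'eol', 'tickets over 30']
--     s = kpi_name.lower()
--     # single left-to-right sweep over positions: at each position test whether
--     # any phrase starts there (position-first instead of phrase-first scan)
--     for i in range(len(s) + 1):
--         for p in phrases:
--             if s.startswith(p, i):
--                 return 'lower_is_better'
--     return 'higher_is_better'
-- ===== Notes on version B (the rewrite author's own statement) =====
-- stated objective: alternative
-- what changed: Replaced the phrase-first loop of separate substring searches with one left-to-right sweep over string positions that tests every phrase as a prefix at each position (position-first single pass).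
import Mathlib
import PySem

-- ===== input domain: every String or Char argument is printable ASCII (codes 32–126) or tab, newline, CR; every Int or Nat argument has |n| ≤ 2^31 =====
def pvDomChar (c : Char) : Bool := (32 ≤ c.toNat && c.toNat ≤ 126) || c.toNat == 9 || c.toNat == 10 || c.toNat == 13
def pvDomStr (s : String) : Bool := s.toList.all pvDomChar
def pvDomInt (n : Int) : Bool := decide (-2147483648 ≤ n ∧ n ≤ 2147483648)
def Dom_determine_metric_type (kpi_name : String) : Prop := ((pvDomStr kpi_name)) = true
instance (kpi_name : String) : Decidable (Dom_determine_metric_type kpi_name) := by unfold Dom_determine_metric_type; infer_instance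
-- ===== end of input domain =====

-- B replaces A's phrase-first loop of substring searches by one position-first sweep; alternative structure, same cost class.

-- ===== PORT A =====
-- A's phrase loop: first phrase contained in the lowered name wins
def dmtLoopA (kpi_lower : String) : List String → String
  | [] => "higher_is_better"
  | p :: rest =>
      if PySem.Str.isIn p kpi_lower then "lower_is_better" else dmtLoopA kpi_lower rest

def determine_metric_type (kpi_name : String) : String :=
  let lower_is_better : List String :=
    ["response time", "resolution time", "tickets >7", "failed backup",
     "missing", "windows 7", "eol", "tickets over 30"]
  let kpi_lower := PySem.Str.lower kpi_name
  dmtLoopA kpi_lower lower_is_better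

-- ===== PORT B =====
def dmtPhrasesB : List (List Char) :=
  ["response time".toList, "resolution time".toList, "tickets >7".toList,
   "failed backup".toList, "missing".toList, "windows 7".toList,
   "eol".toList, "tickets over 30".toList]

-- B's position sweep: walk the suffixes of s, testing every phrase as a prefix there
def dmtScanB : List Char → Bool
  | [] => dmtPhrasesB.any (fun p => PySem.Chars.startswith [] p)
  | c :: t =>
      dmtPhrasesB.any (fun p => PySem.Chars.startswith (c :: t) p) || dmtScanB t

def determine_metric_type_alt (kpi_name : String) : String :=
  let s := PySem.Chars.lower kpi_name.toList
  if dmtScanB s then "lower_is_better" else "higher_is_better"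

-- ===== PRECONDITION & SPEC =====
def Spec_determine_metric_type (kpi_name : String) (out : String) : Prop := out = determine_metric_type_alt kpi_name
instance (kpi_name : String) (out : String) : Decidable (Spec_determine_metric_type kpi_name out) := by unfold Spec_determine_metric_type; infer_instance

-- ===== CLAIM (what is proved, stated in full; the proofs are below) =====
def Claim_equal_determine_metric_type : Prop := ∀ (kpi_name : String), Dom_determine_metric_type kpi_name → Spec_determine_metric_type kpi_name (determine_metric_type kpi_name)

-- ===== LEMMAS AND PROOFS =====

-- B's sweep finds a phrase iff some phrase is a substring
theorem dmtScanB_iff (s : List Char) :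
    dmtScanB s = true ↔ ∃ p ∈ dmtPhrasesB, PySem.Chars.isIn p s = true := by
  induction s with
  | nil =>
      simp [dmtScanB, List.any_eq_true, PySem.Chars.startswith_iff,
        PySem.Chars.isIn_iff_infix, List.prefix_nil, List.infix_nil]
  | cons c t ih =>
      simp only [dmtScanB, Bool.or_eq_true, List.any_eq_true, ih,
        PySem.Chars.startswith_iff, PySem.Chars.isIn_iff_infix, List.infix_cons_iff]
      constructor
      · rintro (⟨p, hp, h⟩ | ⟨p, hp, h⟩)
        · exact ⟨p, hp, Or.inl h⟩
        · exact ⟨p, hp, Or.inr h⟩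
      · rintro ⟨p, hp, h | h⟩
        · exact Or.inl ⟨p, hp, h⟩
        · exact Or.inr ⟨p, hp, h⟩

-- A's loop returns "lower_is_better" iff some phrase is contained
theorem dmtLoopA_eq (kpi_lower : String) (ps : List String) :
    dmtLoopA kpi_lower ps =
      (if ps.any (fun p => PySem.Str.isIn p kpi_lower) then "lower_is_better"
       else "higher_is_better") := by
  induction ps with
  | nil => simp [dmtLoopA]
  | cons p rest ih =>
      simp only [dmtLoopA, ih, List.any_cons, Bool.or_eq_true, PySem.Str.isIn_eq]
      by_cases h : PySem.Chars.isIn p.toList kpi_lower.toList <;> simp [h]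

-- ===== VERDICT (by name: the statement is the Claim_ definition above) =====
theorem determine_metric_type_spec : Claim_equal_determine_metric_type := by
  intro kpi_name _
  unfold Spec_determine_metric_type determine_metric_type determine_metric_type_alt
  rw [dmtLoopA_eq]
  congr 1
  rw [Bool.eq_iff_iff]
  simp [dmtScanB_iff, dmtPhrasesB, PySem.Str.isIn_eq, PySem.Str.toList_lower]
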